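-- pv_equiv track=rewrite | github.com/Corten-Browser/Corten-Python-JavascriptRuntime | components/intl_collator/src/comparison.py | _compare_with_case_first
-- ===== SOURCE A (Python) =====
-- def _compare_with_case_first(s1, s2, case_first):
--     """Compare with caseFirst preference."""
--     # First compare ignoring case
--     s1_lower = s1.lower()
--     s2_lower = s2.lower()
--
--     if s1_lower != s2_lower:
--         # Different base strings
--         if s1_lower < s2_lower:
--             return -1
--         else:
--             return 1
--
--     # Same base string, apply case ordering
--     if s1 == s2:
--         return 0
--
--     # Check case differences
--     has_upper_s1 = any(c.isupper() for c in s1)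
--     has_upper_s2 = any(c.isupper() for c in s2)
--
--     if has_upper_s1 != has_upper_s2:
--         if case_first == 'upper':
--             # Uppercase first
--             return -1 if has_upper_s1 else 1
--         else:  # lower
--             # Lowercase first
--             return 1 if has_upper_s1 else -1
--
--     # Fall back to standard comparison
--     if s1 < s2:
--         return -1
--     elif s1 > s2:
--         return 1
--     else:
--         return 0
-- ===== SOURCE B (Python) =====
-- def _compare_with_case_first(s1, s2, case_first):
--     """Compare with caseFirst preference."""
--     def key(s):
--         has_upper = any(c.isupper() for c in s)
--         if case_first == 'upper':
--             rank = 0 if has_upper else 1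
--         else:
--             rank = 1 if has_upper else 0
--         return (s.lower(), rank, s)
--     k1 = key(s1)
--     k2 = key(s2)
--     return (k1 > k2) - (k1 < k2)
-- ===== Notes on version B (the rewrite author's own statement) =====
-- stated objective: simpler
-- what changed: Replaced the branch cascade with a single sort-key comparison: each string maps to the tuple (s.lower(), case_rank, s) and the result is the sign of the tuple comparison.
import Mathlib
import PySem

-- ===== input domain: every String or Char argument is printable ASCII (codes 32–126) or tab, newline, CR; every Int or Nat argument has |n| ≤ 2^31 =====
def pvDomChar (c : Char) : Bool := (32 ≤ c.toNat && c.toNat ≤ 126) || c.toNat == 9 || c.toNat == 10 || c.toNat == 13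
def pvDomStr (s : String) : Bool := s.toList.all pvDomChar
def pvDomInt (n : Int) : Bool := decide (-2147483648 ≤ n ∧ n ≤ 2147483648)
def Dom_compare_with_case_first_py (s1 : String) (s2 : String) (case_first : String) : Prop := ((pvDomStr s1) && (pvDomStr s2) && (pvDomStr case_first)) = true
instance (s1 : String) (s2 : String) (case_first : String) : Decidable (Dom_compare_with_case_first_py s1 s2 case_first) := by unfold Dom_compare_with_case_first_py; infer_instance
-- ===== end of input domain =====

-- B replaces A's branch cascade by a single sort-key tuple comparison (simpler decomposition, same cost).

-- ===== PORT A =====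
def compare_with_case_first_py (s1 : String) (s2 : String) (case_first : String) : Int :=
  let s1_lower := PySem.Str.lower s1
  let s2_lower := PySem.Str.lower s2
  if s1_lower ≠ s2_lower then
    if s1_lower < s2_lower then -1 else 1
  else if s1 = s2 then 0
  else
    let has_upper_s1 := s1.toList.any PySem.Chars.isupper
    let has_upper_s2 := s2.toList.any PySem.Chars.isupper
    if has_upper_s1 ≠ has_upper_s2 then
      if case_first = "upper" then
        if has_upper_s1 then -1 else 1
      else
        if has_upper_s1 then 1 else -1
    else
      if s1 < s2 then -1
      else if s2 < s1 then 1
      else 0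

-- ===== PORT B =====
-- Python tuple '<' on (str, int, str): lexicographic, exact transliteration
def pvKeyLt (a b : String × Int × String) : Bool :=
  decide (a.1 < b.1) || (a.1 == b.1 && (decide (a.2.1 < b.2.1) || (a.2.1 == b.2.1 && decide (a.2.2 < b.2.2))))

def pvKey (case_first : String) (s : String) : String × Int × String :=
  let has_upper := s.toList.any PySem.Chars.isupper
  let rank : Int := if case_first = "upper" then (if has_upper then 0 else 1) else (if has_upper then 1 else 0)
  (PySem.Str.lower s, rank, s)

def compare_with_case_first_py_alt (s1 : String) (s2 : String) (case_first : String) : Int :=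
  let k1 := pvKey case_first s1
  let k2 := pvKey case_first s2
  (if pvKeyLt k2 k1 then (1 : Int) else 0) - (if pvKeyLt k1 k2 then (1 : Int) else 0)

-- ===== PRECONDITION & SPEC =====
def Spec_compare_with_case_first_py (s1 : String) (s2 : String) (case_first : String) (out : Int) : Prop := out = compare_with_case_first_py_alt s1 s2 case_first
instance (s1 : String) (s2 : String) (case_first : String) (out : Int) : Decidable (Spec_compare_with_case_first_py s1 s2 case_first out) := by unfold Spec_compare_with_case_first_py; infer_instance

-- ===== CLAIM (what is proved, stated in full; the proofs are below) =====
def Claim_equal_compare_with_case_first_py : Prop := ∀ (s1 : String) (s2 : String) (case_first : String), Dom_compare_with_case_first_py s1 s2 case_first → Spec_compare_with_case_first_py s1 s2 case_first (compare_with_case_first_py s1 s2 case_first)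

-- ===== LEMMAS AND PROOFS =====

-- ===== VERDICT (by name: the statement is the Claim_ definition above) =====
theorem compare_with_case_first_py_spec : Claim_equal_compare_with_case_first_py := by
  intro s1 s2 cf _
  unfold Spec_compare_with_case_first_py compare_with_case_first_py compare_with_case_first_py_alt pvKey pvKeyLt
  simp only [beq_iff_eq, Bool.or_eq_true, Bool.and_eq_true, decide_eq_true_eq]
  by_cases hl : PySem.Str.lower s1 = PySem.Str.lower s2
  · by_cases hs : s1 = s2
    · subst hs
      simp
    · simp only [hl, ne_eq, not_true_eq_false, if_false, hs, if_false]
      by_cases hu : (s1.toList.any PySem.Chars.isupper) = (s2.toList.any PySem.Chars.isupper)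
      · simp only [hu, not_true_eq_false, if_false]
        rcases lt_trichotomy s1 s2 with h12 | h12 | h12
        · simp [h12, not_lt_of_gt h12]
        · exact absurd h12 hs
        · simp [h12, not_lt_of_gt h12]
      · simp only [hu, not_false_eq_true, if_true]
        by_cases hcf : cf = "upper" <;>
          cases h1 : (s1.toList.any PySem.Chars.isupper) <;>
          cases h2 : (s2.toList.any PySem.Chars.isupper) <;>
          simp_all
  · simp only [hl, ne_eq, not_false_eq_true, if_true]
    rcases lt_trichotomy (PySem.Str.lower s1) (PySem.Str.lower s2) with h | h | h
    · simp [h, not_lt_of_gt h, Ne.symm hl]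
    · exact absurd h hl
    · simp [h, not_lt_of_gt h, Ne.symm hl]
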